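-- pv_equiv track=rewrite | github.com/keras-team/keras-cv | keras_cv/models/object_detection/yolo_v8/compat_anchor_generation.py | get_feature_sizes
-- ===== SOURCE A (Python) =====
-- def get_feature_sizes(input_shape, pyramid_levels=[3, 7]):
--     # https://github.com/google/automl/tree/master/efficientdet/utils.py#L509
--     feature_sizes = [input_shape[:2]]
--     for _ in range(max(pyramid_levels)):
--         pre_feat_size = feature_sizes[-1]
--         feature_sizes.append(
--             ((pre_feat_size[0] - 1) // 2 + 1, (pre_feat_size[1] - 1) // 2 + 1)
--         )  # ceil mode, like padding="SAME" downsampling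
--     return feature_sizes
-- ===== SOURCE B (Python) =====
-- def get_feature_sizes(input_shape, pyramid_levels=[3, 7]):
--     h, w = input_shape[0], input_shape[1]
--     return [input_shape[:2]] + [
--         ((h - 1 >> k) + 1, (w - 1 >> k) + 1)
--         for k in range(1, max(pyramid_levels) + 1)
--     ]
-- ===== Notes on version B (the rewrite author's own statement) =====
-- stated objective: alternative
-- what changed: Replaces the sequential ceil-halving recurrence (each level computed from the previous list entry) with a direct closed-form per-level size ((h-1 >> k) + 1, (w-1 >> k) + 1) computed from the original dimensions, built by a range comprehension.
-- outside the precondition, e.g. on get_feature_sizes((5,), [0]): A returns [(5,)], B raises IndexError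
import Mathlib
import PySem

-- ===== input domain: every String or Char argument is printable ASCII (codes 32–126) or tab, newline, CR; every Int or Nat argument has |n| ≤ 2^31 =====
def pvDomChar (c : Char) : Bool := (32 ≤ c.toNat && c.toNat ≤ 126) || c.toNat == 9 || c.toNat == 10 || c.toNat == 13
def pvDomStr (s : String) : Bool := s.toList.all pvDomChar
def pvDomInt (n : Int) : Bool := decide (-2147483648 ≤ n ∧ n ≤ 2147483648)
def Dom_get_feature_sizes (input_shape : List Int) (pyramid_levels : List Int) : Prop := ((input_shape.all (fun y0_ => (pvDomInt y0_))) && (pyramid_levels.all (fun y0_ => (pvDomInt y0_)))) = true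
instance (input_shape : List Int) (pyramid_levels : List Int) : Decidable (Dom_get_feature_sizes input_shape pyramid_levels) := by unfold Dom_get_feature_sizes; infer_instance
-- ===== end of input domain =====

-- B replaces A's sequential ceil-halving recurrence with a direct per-level
-- closed form ((h-1)//2^k + 1, (w-1)//2^k + 1) over a range comprehension (alternative decomposition, same cost).

-- ===== PORT A =====
-- feature_sizes = [input_shape[:2]]; loop appends from feature_sizes[-1]
def get_feature_sizes (input_shape : List Int) (pyramid_levels : List Int) : List (Int × Int) :=
  let fs0 : List (Int × Int) :=
    [(PySem.List.pyGetD input_shape 0 0, PySem.List.pyGetD input_shape 1 0)]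
  let m : Int := (PySem.List.max? pyramid_levels (fun x => x)).getD 0
  (List.range m.toNat).foldl
    (fun feature_sizes _ =>
      let pre : Int × Int := PySem.List.pyGetD feature_sizes (-1) (0, 0)
      feature_sizes ++
        [(PySem.Int.floordiv (pre.1 - 1) 2 + 1, PySem.Int.floordiv (pre.2 - 1) 2 + 1)])
    fs0

-- ===== PORT B =====
def get_feature_sizes_alt (input_shape : List Int) (pyramid_levels : List Int) : List (Int × Int) :=
  let h : Int := PySem.List.pyGetD input_shape 0 0
  let w : Int := PySem.List.pyGetD input_shape 1 0
  let m : Int := (PySem.List.max? pyramid_levels (fun x => x)).getD 0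
  (h, w) ::
    (PySem.List.pyRange 1 (m + 1) 1).map
      (fun k => ((h - 1) >>> k.toNat + 1, (w - 1) >>> k.toNat + 1))

-- ===== PRECONDITION & SPEC =====
-- Pre_ excludes inputs where Python A raises (max() on empty pyramid_levels; indexing the
-- pre-size pair when input_shape has < 2 entries) and the degenerate len(input_shape) < 2 with
-- max(pyramid_levels) ≤ 0 case, where A returns a short slice that is not a (height, width) pair.
def Pre_get_feature_sizes (input_shape : List Int) (pyramid_levels : List Int) : Prop :=
  2 ≤ input_shape.length ∧ pyramid_levels ≠ []
instance (input_shape : List Int) (pyramid_levels : List Int) : Decidable (Pre_get_feature_sizes input_shape pyramid_levels) := by unfold Pre_get_feature_sizes; infer_instance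

def pvWitness_get_feature_sizes : List Int × List Int := ([640, 480], [3, 7])

def Spec_get_feature_sizes (input_shape : List Int) (pyramid_levels : List Int) (out : List (Int × Int)) : Prop := out = get_feature_sizes_alt input_shape pyramid_levels
instance (input_shape : List Int) (pyramid_levels : List Int) (out : List (Int × Int)) : Decidable (Spec_get_feature_sizes input_shape pyramid_levels out) := by unfold Spec_get_feature_sizes; infer_instance

-- ===== CLAIM (what is proved, stated in full; the proofs are below) =====
def Claim_equal_get_feature_sizes : Prop := ∀ (input_shape : List Int) (pyramid_levels : List Int), Dom_get_feature_sizes input_shape pyramid_levels → Pre_get_feature_sizes input_shape pyramid_levels → Spec_get_feature_sizes input_shape pyramid_levels (get_feature_sizes input_shape pyramid_levels)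

-- ===== LEMMAS AND PROOFS =====

-- Python's  a >> k  is floor division by 2^k
lemma pv_shiftRight_eq_floordiv (a : Int) (k : Nat) :
    a >>> ((k : Int)) = PySem.Int.floordiv a (2 ^ k) := by
  rw [Int.shiftRight_natCast_right]
  show a >>> k = Int.fdiv a (2 ^ k)
  rw [Int.shiftRight_eq_div_pow, Int.fdiv_eq_ediv_of_nonneg _ (by positivity)]
  norm_cast

-- one ceil-halving step applied to the level-k closed form gives the level-(k+1) closed form
lemma pv_step_closed (a : Int) (n : Nat) :
    PySem.Int.floordiv (PySem.Int.floordiv a (2 ^ n)) 2 = PySem.Int.floordiv a (2 ^ (n + 1)) := by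
  show (a.fdiv (2 ^ n)).fdiv 2 = a.fdiv (2 ^ (n + 1))
  rw [Int.fdiv_eq_ediv_of_nonneg _ (by positivity), Int.fdiv_eq_ediv_of_nonneg _ (by norm_num),
      Int.fdiv_eq_ediv_of_nonneg _ (by positivity), Int.ediv_ediv_of_nonneg (by positivity)]
  ring_nf

-- A's fold equals the closed-form map, for every iteration count n
lemma pv_fold_closed (h w : Int) (n : Nat) :
    (List.range n).foldl
      (fun feature_sizes _ =>
        let pre : Int × Int := PySem.List.pyGetD feature_sizes (-1) ((0 : Int), (0 : Int))
        feature_sizes ++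
          [(PySem.Int.floordiv (pre.1 - 1) 2 + 1, PySem.Int.floordiv (pre.2 - 1) 2 + 1)])
      [(h, w)]
    = (List.range (n + 1)).map
        (fun k => (PySem.Int.floordiv (h - 1) (2 ^ k) + 1,
                   PySem.Int.floordiv (w - 1) (2 ^ k) + 1)) := by
  induction n with
  | zero =>
      simp [PySem.Int.floordiv]
  | succ n ih =>
      rw [List.range_succ, List.foldl_append, ih]
      have hne : (List.range (n + 1)).map
          (fun k => (PySem.Int.floordiv (h - 1) (2 ^ k) + 1,
                     PySem.Int.floordiv (w - 1) (2 ^ k) + 1)) ≠ [] := by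
        simp [List.range_succ]
      simp only [List.foldl_cons, List.foldl_nil,
        PySem.List.pyGetD_neg_one _ _ hne]
      have hlast : (List.getLast ((List.range (n + 1)).map
          (fun k => (PySem.Int.floordiv (h - 1) (2 ^ k) + 1,
                     PySem.Int.floordiv (w - 1) (2 ^ k) + 1))) hne)
          = (PySem.Int.floordiv (h - 1) (2 ^ n) + 1,
             PySem.Int.floordiv (w - 1) (2 ^ n) + 1) := by
        rw [List.getLast_eq_getElem]
        simp
      rw [hlast, List.range_succ (n := n + 1), List.map_append]
      simp only [List.map_cons, List.map_nil, add_sub_cancel_right]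
      rw [pv_step_closed, pv_step_closed]

-- ===== VERDICT (by name: the statement is the Claim_ definition above) =====
theorem get_feature_sizes_spec : Claim_equal_get_feature_sizes := by
  intro input_shape pyramid_levels _ _
  unfold Spec_get_feature_sizes get_feature_sizes get_feature_sizes_alt
  simp only
  rw [pv_fold_closed]
  rw [PySem.List.pyRange_one, List.map_map, add_sub_cancel_right]
  rw [List.range_succ_eq_map, List.map_cons, List.map_map]
  refine congrArg₂ _ (by simp [PySem.Int.floordiv]) (List.map_congr_left ?_)
  intro k _
  have h1 : ((1 : Int) + (k : Int)).toNat = k + 1 := by omega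
  simp only [Function.comp_def, h1, pv_shiftRight_eq_floordiv]
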